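-- pv_equiv track=rewrite | github.com/lanad01/GENBA | 참조모듈/doosan/utils.py | group_x0
-- ===== SOURCE A (Python) =====
-- def are_similar(x1, x2, threshold=10):
--     """
--     Determine whether two values are similar based on a threshold.
--
--     Args:
--         x1        (float): The first value.
--         x2        (float): The second value.
--         threshold (float): The maximum allowed difference between the two values (default: 10).
--
--     Returns:
--         bool: True if the absolute difference between x1 and x2 is less than or equal to the threshold, False otherwise.
--     """
--
--     return abs(x1 - x2) <= threshold
--
-- def group_x0(data, threshold=10):
--     """
--     Group coordinates based on the x0 value to sort a multi-column document.
--
--     The grouping helps in parsing the document in a top-left to bottom-left,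
--     then top-right to bottom-right order based on x0 and y0 coordinates.
--
--     Args:
--         data      (list): A list of coordinates or items, where each item is expected
--                           to have the x0 value at index 0.
--         threshold (int) : The threshold for grouping x0 coordinates.
--                           Larger values result in broader groupings.
--
--     Returns:
--         list: A list of grouped indices based on the x0 values.
--     """
--
--     grouped_indices = []  # To store groups of indices
--     current_group = []  # Current group being processed
--
--     # Iterate through the data to group indices
--     for idx, item in enumerate(data):
--         # If the current group is empty or the current item's x0 is similar to the last group's x0
--         if not current_group or are_similar(item[0], data[current_group[-1]][0], threshold):
--             current_group.append(idx)  # Add to the current group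
--         else:
--             # Save the current group and start a new group
--             grouped_indices.append(current_group)
--             current_group = [idx]
--
--     # Append the last group if it exists
--     if current_group:
--         grouped_indices.append(current_group)
--
--     return grouped_indices
-- ===== SOURCE B (Python) =====
-- def are_similar(x1, x2, threshold=10):
--     return abs(x1 - x2) <= threshold
--
-- def group_x0(data, threshold=10):
--     if not data:
--         return []
--     cuts = [i for i in range(1, len(data))
--             if not are_similar(data[i][0], data[i - 1][0], threshold)]
--     bounds = [0] + cuts + [len(data)]
--     return [list(range(s, e)) for s, e in zip(bounds, bounds[1:])]
-- ===== Notes on version B (the rewrite author's own statement) =====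
-- stated objective: alternative
-- what changed: Replaces A's single stateful flush loop (current group + flush-on-dissimilar accumulator) by two passes: first collect the cut positions where consecutive x0 values differ by more than the threshold, then emit the index ranges between consecutive boundaries.
import Mathlib
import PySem

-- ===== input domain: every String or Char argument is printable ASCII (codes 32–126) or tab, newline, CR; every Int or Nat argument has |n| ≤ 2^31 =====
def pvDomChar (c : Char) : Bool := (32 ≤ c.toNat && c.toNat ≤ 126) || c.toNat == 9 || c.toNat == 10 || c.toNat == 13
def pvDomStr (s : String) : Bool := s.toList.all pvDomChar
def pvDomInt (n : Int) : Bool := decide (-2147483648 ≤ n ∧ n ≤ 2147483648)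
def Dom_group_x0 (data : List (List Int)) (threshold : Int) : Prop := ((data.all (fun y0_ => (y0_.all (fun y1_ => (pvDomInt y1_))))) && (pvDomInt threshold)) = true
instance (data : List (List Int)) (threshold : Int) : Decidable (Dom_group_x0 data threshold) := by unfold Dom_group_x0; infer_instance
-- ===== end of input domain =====

-- B replaces A's stateful flush loop by two passes: collect the cut positions, then emit index
-- ranges between consecutive boundaries (objective: alternative decomposition, same cost).
-- item[0] / data[j][0] are ported with pyGetD (default 0/[]); exact under Pre_, which excludes
-- exactly the inputs where the Python indexing raises.

-- ===== PORT A =====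
def are_similar (x1 x2 threshold : Int) : Bool := decide (|x1 - x2| ≤ threshold)

def group_x0_loop (data : List (List Int)) (threshold : Int) :
    List (Int × List Int) → List (List Int) × List Int → List (List Int) × List Int
  | [], st => st
  | p :: rest, st =>
      group_x0_loop data threshold rest
        (if st.2.isEmpty || are_similar (PySem.List.pyGetD p.2 0 0)
              (PySem.List.pyGetD (PySem.List.pyGetD data (PySem.List.pyGetD st.2 (-1) 0) []) 0 0)
              threshold
         then (st.1, st.2 ++ [p.1])
         else (st.1 ++ [st.2], [p.1]))

def group_x0 (data : List (List Int)) (threshold : Int) : List (List Int) :=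
  let st := group_x0_loop data threshold (PySem.List.enumerate data 0) ([], [])
  if st.2.isEmpty then st.1 else st.1 ++ [st.2]

-- ===== PORT B =====
def group_x0_alt (data : List (List Int)) (threshold : Int) : List (List Int) :=
  if data = [] then []
  else
    let cuts := (PySem.List.pyRange 1 (data.length : Int) 1).filter (fun i =>
      ! are_similar (PySem.List.pyGetD (PySem.List.pyGetD data i []) 0 0)
                    (PySem.List.pyGetD (PySem.List.pyGetD data (i - 1) []) 0 0) threshold)
    let bounds := [(0 : Int)] ++ cuts ++ [(data.length : Int)]
    (bounds.zip bounds.tail).map (fun p => PySem.List.pyRange p.1 p.2 1)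

-- ===== PRECONDITION & SPEC =====
-- Pre_ excludes exactly the inputs where the Python A (and B) raise IndexError:
-- with at least two rows, every consecutive pair is compared, so any empty row raises.
def Pre_group_x0 (data : List (List Int)) (threshold : Int) : Prop :=
  data.length ≤ 1 ∨ ∀ item ∈ data, item ≠ []
instance (data : List (List Int)) (threshold : Int) : Decidable (Pre_group_x0 data threshold) := by
  unfold Pre_group_x0; infer_instance

def pvWitness_group_x0 : List (List Int) × Int := ([[0, 5], [3, 7], [100, 2], [104, 1]], 10)

def Spec_group_x0 (data : List (List Int)) (threshold : Int) (out : List (List Int)) : Prop := out = group_x0_alt data threshold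
instance (data : List (List Int)) (threshold : Int) (out : List (List Int)) : Decidable (Spec_group_x0 data threshold out) := by unfold Spec_group_x0; infer_instance

-- ===== CLAIM (what is proved, stated in full; the proofs are below) =====
def Claim_equal_group_x0 : Prop := ∀ (data : List (List Int)) (threshold : Int), Dom_group_x0 data threshold → Pre_group_x0 data threshold → Spec_group_x0 data threshold (group_x0 data threshold)

-- ===== LEMMAS AND PROOFS =====

-- x0 value of row i (as both ports compute it through pyGetD)
def x0v (data : List (List Int)) (i : Int) : Int :=
  PySem.List.pyGetD (PySem.List.pyGetD data i []) 0 0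

-- the cut predicate of port B
def cutB (data : List (List Int)) (threshold : Int) (i : Int) : Bool :=
  ! are_similar (x0v data i) (x0v data (i - 1)) threshold

-- groups from a boundary list
def mkG (bs : List Int) : List (List Int) :=
  (bs.zip bs.tail).map (fun p => PySem.List.pyRange p.1 p.2 1)

-- greedy group builder: current group `cur`, next index `n`
def bG (data : List (List Int)) (threshold : Int) (cur : List Int) (n : Nat) : List (List Int) :=
  if h : n < data.length then
    if cutB data threshold (n : Int) then
      cur :: bG data threshold [(n : Int)] (n + 1)
    else
      bG data threshold (cur ++ [(n : Int)]) (n + 1)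
  else [cur]
termination_by data.length - n

lemma mkG_cons (a b : Int) (l : List Int) :
    mkG (a :: b :: l) = PySem.List.pyRange a b 1 :: mkG (b :: l) := rfl

lemma bG_eq_mkG (data : List (List Int)) (threshold : Int) :
    ∀ k n (a : Int), data.length - n = k → n ≤ data.length → a ≤ (n : Int) →
      bG data threshold (PySem.List.pyRange a (n : Int) 1) n
        = mkG (a :: (PySem.List.pyRange (n : Int) (data.length : Int) 1).filter
                 (cutB data threshold) ++ [(data.length : Int)]) := by
  intro k
  induction k with
  | zero =>
    intro n a hk hn _
    have hn' : n = data.length := by omega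
    subst hn'
    rw [bG]
    simp [PySem.List.pyRange_one_eq_nil (le_refl (data.length : Int)), mkG]
  | succ k ih =>
    intro n a hk hn ha
    have hlt : n < data.length := by omega
    have hltI : (n : Int) < (data.length : Int) := by exact_mod_cast hlt
    rw [PySem.List.pyRange_one_cons hltI]
    rw [bG]
    simp only [hlt, dif_pos, List.filter_cons]
    by_cases hc : cutB data threshold (n : Int)
    · simp only [hc, if_pos, List.cons_append]
      rw [mkG_cons]
      have := ih (n + 1) (n : Int) (by omega) (by omega) (by push_cast; omega)
      rw [← PySem.List.pyRange_one_singleton (n : Int)]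
      rw [show ((n : Nat) : Int) + 1 = (((n + 1 : Nat) : Nat) : Int) by push_cast; ring] at *
      rw [this]
      simp [List.cons_append]
    · simp only [hc, if_neg, Bool.false_eq_true, not_false_iff]
      have hsucc : PySem.List.pyRange a (n : Int) 1 ++ [(n : Int)]
          = PySem.List.pyRange a ((n : Int) + 1) 1 :=
        (PySem.List.pyRange_one_succ_right ha).symm
      rw [hsucc]
      have := ih (n + 1) a (by omega) (by omega) (by push_cast; omega)
      rw [show ((n : Nat) : Int) + 1 = (((n + 1 : Nat) : Nat) : Int) by push_cast; ring] at *
      rw [this]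

def finalize (st : List (List Int) × List Int) : List (List Int) :=
  if st.2.isEmpty then st.1 else st.1 ++ [st.2]

lemma loop_eq_bG (data : List (List Int)) (threshold : Int) :
    ∀ k n (a : Int) (grouped : List (List Int)),
      data.length - n = k → 1 ≤ n → n ≤ data.length → a < (n : Int) →
      finalize (group_x0_loop data threshold
          (PySem.List.enumerate (data.drop n) (n : Int)) (grouped, PySem.List.pyRange a (n : Int) 1))
        = grouped ++ bG data threshold (PySem.List.pyRange a (n : Int) 1) n := by
  intro k
  induction k with
  | zero =>
    intro n a grouped hk h1 hn ha
    have hn' : n = data.length := by omega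
    subst hn'
    simp only [List.drop_length, PySem.List.enumerate_nil, group_x0_loop]
    rw [bG]
    have hne : PySem.List.pyRange a (data.length : Int) 1 ≠ [] := by
      have : a ∈ PySem.List.pyRange a (data.length : Int) 1 :=
        (PySem.List.mem_pyRange_one).mpr ⟨le_refl _, ha⟩
      intro h; rw [h] at this; exact absurd this (List.not_mem_nil)
    simp [finalize, List.isEmpty_iff, hne]
  | succ k ih =>
    intro n a grouped hk h1 hn ha
    have hlt : n < data.length := by omega
    rw [List.drop_eq_getElem_cons hlt, PySem.List.enumerate_cons, group_x0_loop]
    -- current group is nonempty, its last element is n - 1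
    have hne : PySem.List.pyRange a (n : Int) 1 ≠ [] := by
      have : a ∈ PySem.List.pyRange a (n : Int) 1 :=
        (PySem.List.mem_pyRange_one).mpr ⟨le_refl _, ha⟩
      intro h; rw [h] at this; exact absurd this (List.not_mem_nil)
    have hsplit : PySem.List.pyRange a (n : Int) 1
        = PySem.List.pyRange a ((n : Int) - 1) 1 ++ [(n : Int) - 1] := by
      have := PySem.List.pyRange_one_succ_right (a := a) (b := (n : Int) - 1) (by omega)
      simpa using this
    have hlast : PySem.List.pyGetD (PySem.List.pyRange a (n : Int) 1) (-1) 0 = (n : Int) - 1 := by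
      rw [hsplit, PySem.List.pyGetD_neg_one_append_singleton]
    have hitem : PySem.List.pyGetD data[n] 0 0 = x0v data (n : Int) := by
      have : PySem.List.pyGetD data (n : Int) [] = data[n] := by
        simp [PySem.List.pyGetD_natCast, List.getD_eq_getElem?_getD, hlt]
      rw [x0v, this]
    have hemp : (PySem.List.pyRange a (n : Int) 1).isEmpty = false := by
      simp [hne]
    have hsim : are_similar (PySem.List.pyGetD data[n] 0 0)
        (PySem.List.pyGetD (PySem.List.pyGetD data ((n : Int) - 1) []) 0 0) threshold
        = ! cutB data threshold (n : Int) := by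
      simp [cutB, x0v, hitem]
    simp only [hlast, hemp, hitem, Bool.false_or]
    rw [bG]
    simp only [hlt, dif_pos]
    by_cases hc : cutB data threshold (n : Int)
    · rw [if_pos hc]
      have hsim' : are_similar (x0v data (n : Int)) (PySem.List.pyGetD
          (PySem.List.pyGetD data ((n : Int) - 1) []) 0 0) threshold = false := by
        rw [← hitem, hsim, hc]; rfl
      simp only [hsim', Bool.false_eq_true, if_false]
      have hthis := ih (n + 1) (n : Int) (grouped ++ [PySem.List.pyRange a (n : Int) 1])
        (by omega) (by omega) (by omega) (by push_cast; omega)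
      push_cast at hthis ⊢
      rw [PySem.List.pyRange_one_singleton (n : Int)] at hthis
      rw [hthis, List.append_assoc]
      rfl
    · rw [if_neg hc]
      have hsim' : are_similar (x0v data (n : Int)) (PySem.List.pyGetD
          (PySem.List.pyGetD data ((n : Int) - 1) []) 0 0) threshold = true := by
        rw [← hitem, hsim]; simp [hc]
      simp only [hsim', if_true]
      have hthis := ih (n + 1) a grouped (by omega) (by omega) (by omega) (by push_cast; omega)
      push_cast at hthis ⊢
      rw [PySem.List.pyRange_one_succ_right (by omega : a ≤ (n : Int))] at hthis
      exact hthis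

lemma alt_eq (data : List (List Int)) (threshold : Int) (hne : data ≠ []) :
    group_x0_alt data threshold
      = mkG (0 :: (PySem.List.pyRange 1 (data.length : Int) 1).filter (cutB data threshold)
              ++ [(data.length : Int)]) := by
  unfold group_x0_alt
  rw [if_neg hne]
  rfl

-- ===== VERDICT (by name: the statement is the Claim_ definition above) =====
theorem group_x0_spec : Claim_equal_group_x0 := by
  intro data threshold _ _
  unfold Spec_group_x0
  cases data with
  | nil => rfl
  | cons d rest =>
    set data := d :: rest with hdata
    have hne : data ≠ [] := by simp [hdata]
    have hlen : 1 ≤ data.length := by simp [hdata]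
    have h0 : group_x0 data threshold
        = finalize (group_x0_loop data threshold
            (PySem.List.enumerate (data.drop 1) (1 : Int)) ([], PySem.List.pyRange 0 1 1)) := by
      rw [group_x0]
      have : PySem.List.enumerate data 0
          = (0, d) :: PySem.List.enumerate (data.drop 1) 1 := by
        simp [hdata, PySem.List.enumerate_cons]
      rw [this, group_x0_loop]
      have e1 : PySem.List.pyRange 0 1 1 = [(0 : Int)] := by decide
      simp [e1, finalize]
    rw [h0]
    have h1 := loop_eq_bG data threshold (data.length - 1) 1 0 []
      (by omega) (le_refl _) hlen (by norm_num)
    simp only [Nat.cast_one] at h1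
    rw [h1, List.nil_append]
    have h2 := bG_eq_mkG data threshold (data.length - 1) 1 0 (by omega) hlen (by norm_num)
    simp only [Nat.cast_one] at h2
    rw [h2, alt_eq data threshold hne]
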